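-- pv_equiv track=rewrite | github.com/avawda/CodeSignal-Python | C - Smooth Sailing/13 - reverseInParentheses.py | reverseInParentheses
-- ===== SOURCE A (Python) =====
-- def reverseInParentheses(inputString):
--     # Recursive end condition
--     if "(" not in inputString:
--         return inputString
--
--     leftPar = inputString.find("(")
--     rightPar = inputString.find(")")
--     output = inputString[leftPar + 1:rightPar]
--     output = output[::-1]
--     return reverseInParentheses(output)
-- ===== SOURCE B (Python) =====
-- def reverseInParentheses(inputString):
--     # Iterative: cut out the content of the first "(...)" group and rebuild it
--     # reversed by prepending characters to an accumulator, until no "(" is left.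
--     while True:
--         i = inputString.find("(")
--         if i < 0:
--             return inputString
--         out = ""
--         for c in inputString[i + 1:inputString.find(")")]:
--             out = c + out
--         inputString = out
-- ===== Notes on version B (the rewrite author's own statement) =====
-- stated objective: alternative
-- what changed: Replaces A's tail recursion with an explicit while loop, replaces the membership test + find pair with a single signed find('(') check, and builds the reversed group content by prepending characters to an accumulator in a for loop instead of slice-reversing with [::-1].
import Mathlib
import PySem

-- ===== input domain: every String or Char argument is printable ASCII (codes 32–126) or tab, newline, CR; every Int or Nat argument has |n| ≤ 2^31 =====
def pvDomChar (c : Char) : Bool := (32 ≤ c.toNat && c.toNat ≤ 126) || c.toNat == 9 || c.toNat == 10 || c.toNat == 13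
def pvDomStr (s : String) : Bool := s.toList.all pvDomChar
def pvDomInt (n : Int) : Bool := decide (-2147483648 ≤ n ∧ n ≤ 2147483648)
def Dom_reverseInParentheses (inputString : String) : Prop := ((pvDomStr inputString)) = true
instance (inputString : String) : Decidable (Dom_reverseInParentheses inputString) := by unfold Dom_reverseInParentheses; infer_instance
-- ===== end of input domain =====

-- B rewrites A's tail recursion as an explicit loop: a single signed find('(') check
-- instead of membership test + find, and the reversed group content built by
-- prepending characters to an accumulator instead of slice + [::-1]; same value everywhere.

-- Shared termination fact, cited by both ports' decreasing_by and the proof: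
-- when '(' occurs in s, the extracted slice is strictly shorter than s.
theorem revInPar_slice_len_lt (s : List Char)
    (h0 : 0 ≤ PySem.Chars.find s ['(']) :
    (PySem.Chars.slice s (some (PySem.Chars.find s ['('] + 1))
      (some (PySem.Chars.find s [')']))).length < s.length := by
  have hin : ['('] <:+: s := (PySem.Chars.find_nonneg_iff _ _).mp h0
  have hlen : 1 ≤ s.length :=
    List.length_pos_of_mem ((List.singleton_infix_iff _ _).mp hin)
  have hcr := PySem.List.clampIdx_le s.length (PySem.Chars.find s [')'])
  simp only [PySem.Chars.slice_eq_listSlice, PySem.List.length_slice]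
  have hca : 1 ≤ PySem.List.clampIdx s.length (PySem.Chars.find s ['('] + 1) := by
    simp only [PySem.List.clampIdx]
    split_ifs with h1 <;> omega
  omega

-- 'out = c + out' over the characters of l: prepend-fold (cited by B's decreasing_by).
theorem foldl_cons_rev (l acc : List Char) :
    l.foldl (fun acc c => c :: acc) acc = l.reverse ++ acc := by
  induction l generalizing acc with
  | nil => simp
  | cons x t ih => simp [List.foldl_cons, ih]

-- ===== PORT A =====
-- A works on the string's character list (PySem.Chars); the String wrapper follows.
def revInParAux (s : List Char) : List Char :=
  if h : PySem.Chars.isIn ['('] s = false then s          -- if "(" not in inputString: return inputString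
  else
    let leftPar : Int := PySem.Chars.find s ['(']          -- inputString.find("(")
    let rightPar : Int := PySem.Chars.find s [')']         -- inputString.find(")")
    -- output = inputString[leftPar+1:rightPar]; output = output[::-1]
    revInParAux (PySem.Chars.slice s (some (leftPar + 1)) (some rightPar)).reverse
termination_by s.length
decreasing_by
  have hin : ['('] <:+: s := (PySem.Chars.isIn_iff_infix _ _).mp (by revert h; simp)
  have h0 : 0 ≤ PySem.Chars.find s ['('] := (PySem.Chars.find_nonneg_iff _ _).mpr hin
  simpa using revInPar_slice_len_lt s h0

def reverseInParentheses (inputString : String) : String :=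
  String.ofList (revInParAux inputString.toList)

-- ===== PORT B =====
-- B on the character list: the 'while True' loop is the tail recursion below.
def revInParAltAux (s : List Char) : List Char :=
  let i : Int := PySem.Chars.find s ['(']                  -- i = inputString.find("(")
  if h : i < 0 then s                                      -- if i < 0: return inputString
  else
    -- out = ""; for c in inputString[i+1:inputString.find(")")]: out = c + out
    revInParAltAux ((PySem.Chars.slice s (some (i + 1))
      (some (PySem.Chars.find s [')']))).foldl (fun acc c => c :: acc) [])
termination_by s.length
decreasing_by
  rw [foldl_cons_rev, List.append_nil, List.length_reverse]
  exact revInPar_slice_len_lt s (by omega)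

def reverseInParentheses_alt (inputString : String) : String :=
  String.ofList (revInParAltAux inputString.toList)

-- ===== PRECONDITION & SPEC =====
def Spec_reverseInParentheses (inputString : String) (out : String) : Prop := out = reverseInParentheses_alt inputString
instance (inputString : String) (out : String) : Decidable (Spec_reverseInParentheses inputString out) := by unfold Spec_reverseInParentheses; infer_instance

-- ===== CLAIM (what is proved, stated in full; the proofs are below) =====
def Claim_equal_reverseInParentheses : Prop := ∀ (inputString : String), Dom_reverseInParentheses inputString → Spec_reverseInParentheses inputString (reverseInParentheses inputString)

-- ===== LEMMAS AND PROOFS =====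

theorem aux_eq (n : Nat) : ∀ s : List Char, s.length ≤ n → revInParAux s = revInParAltAux s := by
  induction n with
  | zero =>
    intro s hs
    have hnil : s = [] := List.eq_nil_of_length_eq_zero (Nat.le_zero.mp hs)
    subst hnil
    rw [revInParAux.eq_def, revInParAltAux.eq_def]
    have hfalse : PySem.Chars.isIn ['('] ([] : List Char) = false := by
      rw [PySem.Chars.isIn_eq_false_iff]; simp
    have hneg : PySem.Chars.find ([] : List Char) ['('] = -1 := by
      rw [PySem.Chars.find_eq_neg_one_iff]; simp
    simp [hfalse, hneg]
  | succ n ih =>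
    intro s hs
    rw [revInParAux.eq_def, revInParAltAux.eq_def]
    by_cases hin : PySem.Chars.isIn ['('] s = false
    · have hneg : PySem.Chars.find s ['('] = -1 := by
        rw [PySem.Chars.find_eq_neg_one_iff]
        rw [PySem.Chars.isIn_eq_false_iff] at hin
        exact hin
      simp [hin, hneg]
    · have hinf : ['('] <:+: s := (PySem.Chars.isIn_iff_infix _ _).mp (by revert hin; simp)
      have h0 : 0 ≤ PySem.Chars.find s ['('] := (PySem.Chars.find_nonneg_iff _ _).mpr hinf
      rw [dif_neg hin]
      dsimp only
      rw [dif_neg (by omega : ¬ PySem.Chars.find s ['('] < 0)]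
      rw [foldl_cons_rev, List.append_nil]
      refine ih _ ?_
      have := revInPar_slice_len_lt s h0
      simp only [List.length_reverse]
      omega

-- ===== VERDICT (by name: the statement is the Claim_ definition above) =====
theorem reverseInParentheses_spec : Claim_equal_reverseInParentheses := by
  intro s _
  unfold Spec_reverseInParentheses reverseInParentheses reverseInParentheses_alt
  exact congrArg String.ofList (aux_eq s.toList.length s.toList le_rfl)
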